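-- pv_equiv track=rewrite | github.com/Koongrizzly/FrameVision | helpers/tetris_game.py | gen_rots
-- ===== SOURCE A (Python) =====
-- def rotate_matrix(m):
--     return [list(row) for row in zip(*m[::-1])]
--
-- def gen_rots(base):
--     rots = [base]
--     for _ in range(3):
--         rots.append(rotate_matrix(rots[-1]))
--     # dedupe (O piece, etc.)
--     uniq, seen = [], set()
--     for r in rots:
--         key = tuple(tuple(row) for row in r)
--         if key not in seen:
--             uniq.append(r); seen.add(key)
--     return uniq
-- ===== SOURCE B (Python) =====
-- def rotate_matrix(m):
--     return [list(row) for row in zip(*m[::-1])]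
--
-- def gen_rots(base):
--     # Single early-terminating pass: rotate the last accepted shape and stop
--     # at the first repeat, instead of generating all 4 rotations then deduping.
--     key = tuple(tuple(row) for row in base)
--     seen = {key}
--     uniq = [base]
--     for _ in range(3):
--         r = rotate_matrix(uniq[-1])
--         k = tuple(tuple(row) for row in r)
--         if k in seen:
--             break
--         uniq.append(r)
--         seen.add(k)
--     return uniq
-- ===== Notes on version B (the rewrite author's own statement) =====
-- stated objective: alternative
-- what changed: B collapses A's generate-all-4-rotations-then-dedup two-phase structure into a single early-terminating loop that rotates the last accepted shape and breaks at the first repeat.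
import Mathlib
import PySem

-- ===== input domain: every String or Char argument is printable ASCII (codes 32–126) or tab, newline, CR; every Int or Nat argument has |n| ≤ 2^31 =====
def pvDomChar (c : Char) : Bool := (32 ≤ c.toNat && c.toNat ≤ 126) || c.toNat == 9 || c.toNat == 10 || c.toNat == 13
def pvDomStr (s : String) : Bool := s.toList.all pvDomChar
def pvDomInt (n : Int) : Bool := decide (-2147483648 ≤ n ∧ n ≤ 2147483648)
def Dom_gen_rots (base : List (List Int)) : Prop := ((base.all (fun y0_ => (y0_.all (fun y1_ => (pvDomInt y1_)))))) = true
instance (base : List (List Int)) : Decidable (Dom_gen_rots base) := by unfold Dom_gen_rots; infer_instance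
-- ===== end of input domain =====

-- B collapses A's generate-then-dedup into one early-terminating rotate loop (alternative decomposition, same cost).


-- ===== PORT A =====
-- zip(*rows): hand port of Python's variadic zip (truncates at the shortest row;
-- zip() of no rows is empty). Exact: the fuel is the first row's length, and zip
-- stops no later than that; when fuel runs out the first row is empty, so the
-- result is [] either way.
def pvZipStarAux : Nat → List (List Int) → List (List Int)
  | 0, _ => []
  | n+1, m =>
      if m.any (fun r => r.isEmpty) then []
      else (m.map (fun r => r.headD 0)) :: pvZipStarAux n (m.map (fun r => r.tail))

def pvZipStar (m : List (List Int)) : List (List Int) :=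
  if m = [] then [] else pvZipStarAux ((m.headD []).length) m

-- rotate_matrix: [list(row) for row in zip(*m[::-1])]
def rotateMatrix (m : List (List Int)) : List (List Int) := pvZipStar m.reverse

-- gen_rots (A): build rots = [base] ++ 3 rotations, then dedup with a seen-set.
-- key = tuple(tuple(row) for row in r) is an injective re-encoding of r with the
-- same equality, so the port uses r itself as the key.
def gen_rots (base : List (List Int)) : List (List (List Int)) :=
  let rots := (List.range 3).foldl
    (fun rots _ => rots ++ [rotateMatrix (rots.getLastD [])]) [base]
  (rots.foldl
    (fun (p : List (List (List Int)) × PySem.Set (List (List Int))) r =>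
      if PySem.Set.contains p.2 r then p else (p.1 ++ [r], PySem.Set.add p.2 r))
    ([], PySem.Set.empty)).1

-- ===== PORT B =====
-- the 'for _ in range(3): … break' loop of Source B, as a counted recursion
def genRotsGo : Nat → List (List (List Int)) → PySem.Set (List (List Int)) → List (List (List Int))
  | 0, uniq, _ => uniq
  | n+1, uniq, seen =>
      let r := rotateMatrix (uniq.getLastD [])
      if PySem.Set.contains seen r then uniq
      else genRotsGo n (uniq ++ [r]) (PySem.Set.add seen r)

def gen_rots_alt (base : List (List Int)) : List (List (List Int)) :=
  genRotsGo 3 [base] (PySem.Set.add PySem.Set.empty base)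

-- ===== PRECONDITION & SPEC =====
def Spec_gen_rots (base : List (List Int)) (out : List (List (List Int))) : Prop := out = gen_rots_alt base
instance (base : List (List Int)) (out : List (List (List Int))) : Decidable (Spec_gen_rots base out) := by unfold Spec_gen_rots; infer_instance

-- ===== CLAIM (what is proved, stated in full; the proofs are below) =====
def Claim_equal_gen_rots : Prop := ∀ (base : List (List Int)), Dom_gen_rots base → Spec_gen_rots base (gen_rots base)

-- ===== LEMMAS AND PROOFS =====

theorem gen_rots_eq_alt (b : List (List Int)) : gen_rots b = gen_rots_alt b := by
  -- A's first loop produces exactly [b, f b, f² b, f³ b]; then case-split on which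
  -- rotation first coincides with an earlier one (the sequence r_{k+1} = f r_k cycles
  -- from that point on, which is why B's break loses nothing).
  have hA : gen_rots b =
    (([b, rotateMatrix b, rotateMatrix (rotateMatrix b), rotateMatrix (rotateMatrix (rotateMatrix b))].foldl
      (fun (p : List (List (List Int)) × PySem.Set (List (List Int))) r =>
        if PySem.Set.contains p.2 r then p else (p.1 ++ [r], PySem.Set.add p.2 r))
      ([], PySem.Set.empty)).1) := rfl
  rw [hA]
  by_cases h1 : rotateMatrix b = b
  · simp [gen_rots_alt, genRotsGo, h1, PySem.Set.contains, PySem.Set.add, PySem.Set.empty]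
  · by_cases h2 : rotateMatrix (rotateMatrix b) = b
    · simp [gen_rots_alt, genRotsGo, h1, h2, PySem.Set.contains, PySem.Set.add, PySem.Set.empty]
    · by_cases h2' : rotateMatrix (rotateMatrix b) = rotateMatrix b
      · simp [gen_rots_alt, genRotsGo, h1, h2', PySem.Set.contains, PySem.Set.add, PySem.Set.empty]
      · by_cases h3a : rotateMatrix (rotateMatrix (rotateMatrix b)) = b
        · simp [gen_rots_alt, genRotsGo, h1, h2, h2', h3a, PySem.Set.contains, PySem.Set.add, PySem.Set.empty]
        · by_cases h3b : rotateMatrix (rotateMatrix (rotateMatrix b)) = rotateMatrix b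
          · simp [gen_rots_alt, genRotsGo, h1, h2, h2', h3b, PySem.Set.contains, PySem.Set.add, PySem.Set.empty]
          · by_cases h3c : rotateMatrix (rotateMatrix (rotateMatrix b)) = rotateMatrix (rotateMatrix b)
            · simp [gen_rots_alt, genRotsGo, h1, h2, h2', h3c, PySem.Set.contains, PySem.Set.add, PySem.Set.empty]
            · simp [gen_rots_alt, genRotsGo, h1, h2, h2', h3a, h3b, h3c, PySem.Set.contains, PySem.Set.add, PySem.Set.empty]

-- ===== VERDICT (by name: the statement is the Claim_ definition above) =====
theorem gen_rots_spec : Claim_equal_gen_rots := by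
  intro base _
  unfold Spec_gen_rots
  exact gen_rots_eq_alt base
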